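-- pv_equiv track=rewrite | github.com/MarkSon-42/Team_ALGO | jongwon/프로그래머스/lv1/67256. ［카카오 인턴］ 키패드 누르기/［카카오 인턴］ 키패드 누르기.py | solution
-- ===== SOURCE A (Python) =====
-- def solution(numbers, hand):
--     key_pad = {1: [0, 0], 2: [0, 1], 3: [0, 2], # 키패드를 숫자를 key, 그에 해당하는 좌표를 value로 딕셔너리 생성
--            4: [1, 0], 5: [1, 1], 6: [1, 2],
--            7: [2, 0], 8: [2, 1], 9: [2, 2],
--            '*':[3, 0], 0: [3, 1], '#': [3, 2]}
--
--     left_hand_location = key_pad['*'] # 왼손 시작 좌표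
--     right_hand_location = key_pad['#'] # 오른손 시작 좌표
--
--     left_only = [1,4,7] # 왼손만 사용가능 한 곳
--     right_only = [3,6,9] # 오른손만 사용가능 한 곳
--
--     result = ''
--     for number in numbers:
--         current = key_pad[number] # 현재 위치 좌표
--         if number in left_only:
--             result += 'L'
--             left_hand_location  = current
--         elif number in right_only:
--             result += 'R'
--             right_hand_location = current
--         else:
--             left_to_number = 0 # 왼쪽 위치에서 누르려는 버튼까지의 거리
--             right_to_number = 0 # 오른쪽 위치에서 누르려는 버튼까지의 거리
--
--             for i, j, k in zip(left_hand_location, right_hand_location, current): # 거리 계산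
--                 left_to_number += abs(i-k)
--                 right_to_number += abs(j-k)
--
--             # 왼손이 더 가까운 경우
--             if left_to_number < right_to_number:
--                 result += 'L'
--                 left_hand_location = current
--
--             # 오른손이 더 가까운 경우
--             elif left_to_number > right_to_number:
--                 result += 'R'
--                 right_hand_location = current
--
--             # 두 거리가 같은 경우
--             else:
--                 # 왼손잡이 경우
--                 if hand == 'left':
--                     result += 'L'
--                     left_hand_location = current
--
--                 # 오른손잡이 경우
--                 else:
--                     result += 'R'
--                     right_hand_location = current
--     return result
-- ===== SOURCE B (Python) =====
-- def solution(numbers, hand):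
--     # Recursive front-building formulation: each hand's state is a single key
--     # index (digit d -> d-1, 0 -> 10, '*' start = 9, '#' start = 11); the
--     # key's coordinates and distances fall out of //3 and %3, and the hand is
--     # chosen by the key's column (0 -> L, 2 -> R, 1 -> nearer hand, tie char).
--     tie = 'L' if hand == 'left' else 'R'
--
--     def dist(i, j):
--         return abs(i // 3 - j // 3) + abs(i % 3 - j % 3)
--
--     def go(nums, li, ri):
--         if not nums:
--             return ''
--         i = 10 if nums[0] == 0 else nums[0] - 1
--         rest = nums[1:]
--         c = i % 3
--         if c == 0:
--             return 'L' + go(rest, i, ri)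
--         if c == 2:
--             return 'R' + go(rest, li, i)
--         if dist(li, i) < dist(ri, i):
--             return 'L' + go(rest, i, ri)
--         if dist(ri, i) < dist(li, i):
--             return 'R' + go(rest, li, i)
--         return tie + go(rest, i if tie == 'L' else li, ri if tie == 'L' else i)
--
--     return go(numbers, 9, 11)
-- ===== Notes on version B (the rewrite author's own statement) =====
-- stated objective: alternative
-- what changed: Replaces A's iterative string-appending simulation over a coordinate dictionary and left-only/right-only membership lists by a recursive front-building formulation whose per-hand state is a single key index (digit d->d-1, 0->10, starts 9/11), with distances in closed form from //3 and %3 of the index and the hand chosen by the index's column.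
import Mathlib
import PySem

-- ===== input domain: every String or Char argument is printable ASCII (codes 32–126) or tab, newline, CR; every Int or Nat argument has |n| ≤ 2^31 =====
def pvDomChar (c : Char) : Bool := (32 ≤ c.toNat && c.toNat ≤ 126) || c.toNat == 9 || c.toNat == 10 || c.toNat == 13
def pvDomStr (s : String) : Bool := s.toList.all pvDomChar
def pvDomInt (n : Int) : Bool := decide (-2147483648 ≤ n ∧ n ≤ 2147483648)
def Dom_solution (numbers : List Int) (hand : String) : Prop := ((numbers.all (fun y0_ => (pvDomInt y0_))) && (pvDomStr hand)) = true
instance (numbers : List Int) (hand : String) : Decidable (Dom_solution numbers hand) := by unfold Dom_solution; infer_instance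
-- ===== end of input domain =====

-- B replaces A's iterative dict/membership-list simulation by a recursive front-building
-- formulation whose per-hand state is one key index with closed-form //3,%3 distances
-- (objective: alternative).
-- ===== PORT A =====
-- A's dict lookup key_pad[number]: none = KeyError (excluded by Pre_solution)
def keyPadA (n : Int) : Option (List Int) :=
  if n == 1 then some [0, 0] else if n == 2 then some [0, 1] else if n == 3 then some [0, 2]
  else if n == 4 then some [1, 0] else if n == 5 then some [1, 1] else if n == 6 then some [1, 2]
  else if n == 7 then some [2, 0] else if n == 8 then some [2, 1] else if n == 9 then some [2, 2]
  else if n == 0 then some [3, 1] else none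

-- the zip distance loop of A
def distA (lh rh cur : List Int) : Int × Int :=
  (lh.zip (rh.zip cur)).foldl (fun acc t => (acc.1 + |t.1 - t.2.2|, acc.2 + |t.2.1 - t.2.2|)) (0, 0)

-- the main for-loop of A, result accumulated as chars ('L'/'R' appended)
def loopA (hand : String) (ns : List Int) (lh rh : List Int) (res : List Char) : List Char :=
  match ns with
  | [] => res
  | n :: rest =>
    let cur := (keyPadA n).getD []
    if ([1, 4, 7] : List Int).contains n then loopA hand rest cur rh (res ++ ['L'])
    else if ([3, 6, 9] : List Int).contains n then loopA hand rest lh cur (res ++ ['R'])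
    else
      let d := distA lh rh cur
      if d.1 < d.2 then loopA hand rest cur rh (res ++ ['L'])
      else if d.2 < d.1 then loopA hand rest lh cur (res ++ ['R'])
      else if hand == "left" then loopA hand rest cur rh (res ++ ['L'])
      else loopA hand rest lh cur (res ++ ['R'])

def solution (numbers : List Int) (hand : String) : String :=
  String.ofList (loopA hand numbers [3, 0] [3, 2] [])

-- ===== PORT B =====
-- B's closed-form key distance from the single integer key indices
def distB (i j : Int) : Int :=
  |PySem.Int.floordiv i 3 - PySem.Int.floordiv j 3| + |PySem.Int.mod i 3 - PySem.Int.mod j 3|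

-- B's recursive go: builds the answer front-to-back, state = one key index per hand
-- ('L' + go(...) ported as 'L' :: go ..., exact since the result is a string of chars)
def goB (tie : Char) (ns : List Int) (li ri : Int) : List Char :=
  match ns with
  | [] => []
  | n :: rest =>
    let i : Int := if n == 0 then 10 else n - 1
    let c := PySem.Int.mod i 3
    if c == 0 then 'L' :: goB tie rest i ri
    else if c == 2 then 'R' :: goB tie rest li i
    else if distB li i < distB ri i then 'L' :: goB tie rest i ri
    else if distB ri i < distB li i then 'R' :: goB tie rest li i
    else tie :: goB tie rest (if tie == 'L' then i else li) (if tie == 'L' then ri else i)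

def solution_alt (numbers : List Int) (hand : String) : String :=
  String.ofList (goB (if hand == "left" then 'L' else 'R') numbers 9 11)

-- ===== PRECONDITION & SPEC =====
-- A raises KeyError on any number outside 0..9 (not an int key of key_pad); exactly those inputs are excluded.
def Pre_solution (numbers : List Int) (hand : String) : Prop :=
  ∀ n ∈ numbers, 0 ≤ n ∧ n ≤ 9

instance (numbers : List Int) (hand : String) : Decidable (Pre_solution numbers hand) := by
  unfold Pre_solution; infer_instance

def pvWitness_solution : List Int × String := ([1, 3, 4, 5, 8, 2, 1, 4, 5, 9, 5], "right")

def Spec_solution (numbers : List Int) (hand : String) (out : String) : Prop := out = solution_alt numbers hand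
instance (numbers : List Int) (hand : String) (out : String) : Decidable (Spec_solution numbers hand out) := by unfold Spec_solution; infer_instance

-- ===== CLAIM (what is proved, stated in full; the proofs are below) =====
def Claim_equal_solution : Prop := ∀ (numbers : List Int) (hand : String), Dom_solution numbers hand → Pre_solution numbers hand → Spec_solution numbers hand (solution numbers hand)

-- ===== LEMMAS AND PROOFS =====

theorem loopA_append (hand : String) (ns : List Int) (lh rh : List Int) (res : List Char) :
    loopA hand ns lh rh res = res ++ loopA hand ns lh rh [] := by
  induction ns generalizing lh rh res with
  | nil => simp [loopA]
  | cons n rest ih =>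
    simp only [loopA]
    split_ifs <;>
      · rw [ih, ih _ _ ([] ++ _)]
        simp

set_option maxHeartbeats 4000000 in
theorem core (hand : String) (ns : List Int) (h : ∀ n ∈ ns, 0 ≤ n ∧ n ≤ 9) (li ri : Int) :
    loopA hand ns [PySem.Int.floordiv li 3, PySem.Int.mod li 3]
                  [PySem.Int.floordiv ri 3, PySem.Int.mod ri 3] [] =
      goB (if hand == "left" then 'L' else 'R') ns li ri := by
  induction ns generalizing li ri with
  | nil => simp [loopA, goB]
  | cons n rest ih =>
    obtain ⟨h0, h9⟩ := h n (List.mem_cons_self ..)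
    have hrest : ∀ m ∈ rest, 0 ≤ m ∧ m ≤ 9 := fun m hm => h m (List.mem_cons_of_mem _ hm)
    have ih' := ih hrest
    interval_cases n <;>
    · simp only [loopA, goB, keyPadA, distA, distB]
      norm_num [PySem.Int.floordiv, PySem.Int.mod, List.zip, List.zipWith, List.foldl,
        show Int.fdiv 0 3 = 0 from by decide, show Int.fmod 0 3 = 0 from by decide, show Int.fdiv 1 3 = 0 from by decide, show Int.fmod 1 3 = 1 from by decide, show Int.fdiv 2 3 = 0 from by decide, show Int.fmod 2 3 = 2 from by decide, show Int.fdiv 3 3 = 1 from by decide, show Int.fmod 3 3 = 0 from by decide, show Int.fdiv 4 3 = 1 from by decide, show Int.fmod 4 3 = 1 from by decide, show Int.fdiv 5 3 = 1 from by decide, show Int.fmod 5 3 = 2 from by decide, show Int.fdiv 6 3 = 2 from by decide, show Int.fmod 6 3 = 0 from by decide, show Int.fdiv 7 3 = 2 from by decide, show Int.fmod 7 3 = 1 from by decide, show Int.fdiv 8 3 = 2 from by decide, show Int.fmod 8 3 = 2 from by decide, show Int.fdiv 9 3 = 3 from by decide, show Int.fmod 9 3 = 0 from by decide, show Int.fdiv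 10 3 = 3 from by decide, show Int.fmod 10 3 = 1 from by decide] at ih' ⊢
      by_cases hB : hand = "left" <;>
        (try simp [hB] at ih' ⊢) <;>
        (try split_ifs) <;>
        · rw [loopA_append, ← ih']
          norm_num [show Int.fdiv 0 3 = 0 from by decide, show Int.fmod 0 3 = 0 from by decide, show Int.fdiv 1 3 = 0 from by decide, show Int.fmod 1 3 = 1 from by decide, show Int.fdiv 2 3 = 0 from by decide, show Int.fmod 2 3 = 2 from by decide, show Int.fdiv 3 3 = 1 from by decide, show Int.fmod 3 3 = 0 from by decide, show Int.fdiv 4 3 = 1 from by decide, show Int.fmod 4 3 = 1 from by decide, show Int.fdiv 5 3 = 1 from by decide, show Int.fmod 5 3 = 2 from by decide, show Int.fdiv 6 3 = 2 from by decide, show Int.fmod 6 3 = 0 from by decide, show Int.fdiv 7 3 = 2 from by decide, show Int.fmod 7 3 = 1 from by decide, show Int.fdiv 8 3 = 2 from by decide, show Int.fmod 8 3 = 2 from by decide, show Int.fdiv 9 3 = 3 from by decide, show Int.fmod 9 3 = 0 from by decide, show Int.fdiv 10 3 = 3 from by decide, show Int.fmod 10 3 = 1 from by decide]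

theorem solution_spec : Claim_equal_solution := by
  intro numbers hand _hdom hpre
  unfold Spec_solution solution solution_alt
  have := core hand numbers hpre 9 11
  norm_num [PySem.Int.floordiv, PySem.Int.mod,
    show Int.fdiv 9 3 = 3 from by decide, show Int.fmod 9 3 = 0 from by decide,
    show Int.fdiv 11 3 = 3 from by decide, show Int.fmod 11 3 = 2 from by decide] at this
  rw [this]
  simp
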